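-- pv_equiv track=rewrite | github.com/Winja27/perfect_shuffle | 聚类后线性拟合.py | perfect_shuffle_practice
-- ===== SOURCE A (Python) =====
-- def perfect_shuffle_practice(arr):
--     n = len(arr)
--     if n < 3:
--         return arr
--
--     b = [0] * n
--     mid = (n + 1) // 2
--     for i in range(mid):
--         b[2 * i] = arr[i]
--     for i in range(mid, n):
--         b[2 * (i - mid) + 1] = arr[i]
--     return b
-- ===== SOURCE B (Python) =====
-- def perfect_shuffle_practice(arr):
--     n = len(arr)
--     if n < 3:
--         return arr
--     mid = (n + 1) // 2
--     first = arr[:mid]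
--     second = arr[mid:]
--     result = []
--     for x, y in zip(first, second):
--         result.append(x)
--         result.append(y)
--     if len(first) > len(second):
--         result.append(first[-1])
--     return result
-- ===== Notes on version B (the rewrite author's own statement) =====
-- stated objective: idiomatic
-- what changed: Replaces the preallocated zero buffer written at computed even/odd indices by two index loops with a slice-and-zip pass that appends interleaved pairs and the odd leftover.
import Mathlib
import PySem

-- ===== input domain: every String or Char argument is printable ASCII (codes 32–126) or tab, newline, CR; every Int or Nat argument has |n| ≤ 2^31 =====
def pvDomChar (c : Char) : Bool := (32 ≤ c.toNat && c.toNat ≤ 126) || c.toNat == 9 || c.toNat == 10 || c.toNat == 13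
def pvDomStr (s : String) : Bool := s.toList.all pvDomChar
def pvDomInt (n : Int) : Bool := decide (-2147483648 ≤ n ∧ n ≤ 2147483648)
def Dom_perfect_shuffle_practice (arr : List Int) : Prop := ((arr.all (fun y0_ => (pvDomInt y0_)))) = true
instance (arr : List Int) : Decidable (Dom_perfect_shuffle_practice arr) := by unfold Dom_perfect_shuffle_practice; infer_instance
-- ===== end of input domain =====

-- B rebuilds the shuffle by slicing the two halves and zipping them (idiomatic), instead of
-- A's preallocated zero buffer written at computed even/odd indices by two index loops.

-- ===== PORT A =====
-- indices 2*i, 2*(i-mid)+1 and i are always in range here, so pyGetD/pySetD are exact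
def perfect_shuffle_practice (arr : List Int) : List Int :=
  let n : Int := arr.length
  if n < 3 then arr
  else
    let b : List Int := List.replicate arr.length 0
    let mid : Int := PySem.Int.floordiv (n + 1) 2
    let b := (PySem.List.pyRange 0 mid 1).foldl
      (fun c i => PySem.List.pySetD c (2 * i) (PySem.List.pyGetD arr i 0)) b
    let b := (PySem.List.pyRange mid n 1).foldl
      (fun c i => PySem.List.pySetD c (2 * (i - mid) + 1) (PySem.List.pyGetD arr i 0)) b
    b

-- ===== PORT B =====
def perfect_shuffle_practice_alt (arr : List Int) : List Int :=
  let n : Int := arr.length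
  if n < 3 then arr
  else
    let mid : Int := PySem.Int.floordiv (n + 1) 2
    let first := PySem.List.slice arr none (some mid)
    let second := PySem.List.slice arr (some mid) none
    let result := (first.zip second).foldl (fun r p => r ++ [p.1, p.2]) []
    if second.length < first.length then result ++ [PySem.List.pyGetD first (-1) 0]
    else result

-- ===== PRECONDITION & SPEC =====
def Spec_perfect_shuffle_practice (arr : List Int) (out : List Int) : Prop := out = perfect_shuffle_practice_alt arr
instance (arr : List Int) (out : List Int) : Decidable (Spec_perfect_shuffle_practice arr out) := by unfold Spec_perfect_shuffle_practice; infer_instance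

-- ===== CLAIM (what is proved, stated in full; the proofs are below) =====
def Claim_equal_perfect_shuffle_practice : Prop := ∀ (arr : List Int), Dom_perfect_shuffle_practice arr → Spec_perfect_shuffle_practice arr (perfect_shuffle_practice arr)


-- ===== LEMMAS AND PROOFS =====

-- Nat-level views of A's two write loops
def pvF1 (arr : List Int) (m : Nat) (b : List Int) : List Int :=
  (List.range m).foldl (fun c i => c.set (2 * i) (arr.getD i 0)) b

def pvF2 (arr : List Int) (mid k : Nat) (b : List Int) : List Int :=
  (List.range k).foldl (fun c i => c.set (2 * i + 1) (arr.getD (mid + i) 0)) b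

-- Nat-level view of B's interleaving loop
def pvInter (f s : List Int) : List Int := (f.zip s).flatMap (fun p => [p.1, p.2])

lemma pvF1_succ (arr : List Int) (m : Nat) (b : List Int) :
    pvF1 arr (m + 1) b = (pvF1 arr m b).set (2 * m) (arr.getD m 0) := by
  simp [pvF1, List.range_succ]

lemma pvF2_succ (arr : List Int) (mid k : Nat) (b : List Int) :
    pvF2 arr mid (k + 1) b = (pvF2 arr mid k b).set (2 * k + 1) (arr.getD (mid + k) 0) := by
  simp [pvF2, List.range_succ]

lemma pvF1_len (arr : List Int) (m : Nat) (b : List Int) :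
    (pvF1 arr m b).length = b.length := by
  induction m with
  | zero => simp [pvF1]
  | succ m ih => rw [pvF1_succ]; simpa using ih

lemma pvF2_len (arr : List Int) (mid k : Nat) (b : List Int) :
    (pvF2 arr mid k b).length = b.length := by
  induction k with
  | zero => simp [pvF2]
  | succ k ih => rw [pvF2_succ]; simpa using ih

lemma pvF1_get (arr : List Int) (m : Nat) (b : List Int) (j : Nat) :
    (pvF1 arr m b)[j]? =
      if j % 2 = 0 ∧ j / 2 < m then
        (if j < b.length then some (arr.getD (j / 2) 0) else none)
      else b[j]? := by
  induction m with
  | zero => simp [pvF1]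
  | succ m ih =>
    rw [pvF1_succ, List.getElem?_set, pvF1_len, ih]
    by_cases h2m : 2 * m = j
    · have hj2 : j / 2 = m := by omega
      have hj0 : j % 2 = 0 := by omega
      simp [h2m, hj2, hj0]
    · rw [if_neg h2m]
      split_ifs <;> first | rfl | omega

lemma pvF2_get (arr : List Int) (mid k : Nat) (b : List Int) (j : Nat) :
    (pvF2 arr mid k b)[j]? =
      if j % 2 = 1 ∧ j / 2 < k then
        (if j < b.length then some (arr.getD (mid + j / 2) 0) else none)
      else b[j]? := by
  induction k with
  | zero => simp [pvF2]
  | succ k ih =>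
    rw [pvF2_succ, List.getElem?_set, pvF2_len, ih]
    by_cases h2k : 2 * k + 1 = j
    · have hj2 : j / 2 = k := by omega
      have hj1 : j % 2 = 1 := by omega
      simp [h2k, hj2, hj1]
    · rw [if_neg h2k]
      split_ifs <;> first | rfl | omega

-- Port A, reduced to the Nat-level loops (for 3 ≤ length)
lemma portA_eq (arr : List Int) (h : 3 ≤ arr.length) :
    perfect_shuffle_practice arr =
      pvF2 arr ((arr.length + 1) / 2) (arr.length - (arr.length + 1) / 2)
        (pvF1 arr ((arr.length + 1) / 2) (List.replicate arr.length 0)) := by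
  have h3 : ¬ ((arr.length : Int) < 3) := by exact_mod_cast not_lt.mpr (by exact_mod_cast h)
  have hmid : PySem.Int.floordiv ((arr.length : Int) + 1) 2 = (((arr.length + 1) / 2 : Nat) : Int) := by
    rw [show ((arr.length : Int) + 1) = (((arr.length + 1 : Nat)) : Int) by push_cast; ring]
    exact_mod_cast PySem.Int.floordiv_natCast (arr.length + 1) 2
  simp only [perfect_shuffle_practice, if_neg h3, hmid]
  rw [PySem.List.pyRange_one, PySem.List.pyRange_one]
  rw [List.foldl_map, List.foldl_map]
  rw [show (↑((arr.length + 1) / 2) - (0:Int)).toNat = (arr.length + 1) / 2 by omega]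
  rw [show ((arr.length:Int) - ↑((arr.length + 1) / 2)).toNat = arr.length - (arr.length + 1) / 2 by omega]
  have e1 : ∀ (c : List Int) (k : Nat),
      PySem.List.pySetD c (2 * (0 + (k:Int))) (PySem.List.pyGetD arr (0 + (k:Int)) 0)
        = c.set (2 * k) (arr.getD k 0) := by
    intro c k
    simp only [zero_add]
    rw [show (2 : Int) * (k : Nat) = ((2 * k : Nat) : Int) by push_cast; ring]
    rw [PySem.List.pySetD_natCast, PySem.List.pyGetD_natCast]
  have e2 : ∀ (c : List Int) (k : Nat),
      PySem.List.pySetD c (2 * ((↑((arr.length + 1) / 2) + (k:Int)) - ↑((arr.length + 1) / 2)) + 1)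
          (PySem.List.pyGetD arr (↑((arr.length + 1) / 2) + (k:Int)) 0)
        = c.set (2 * k + 1) (arr.getD ((arr.length + 1) / 2 + k) 0) := by
    intro c k
    rw [show (↑((arr.length + 1) / 2) + (k:Int)) - ↑((arr.length + 1) / 2) = (k:Int) by ring]
    rw [show (2 : Int) * (k : Nat) + 1 = ((2 * k + 1 : Nat) : Int) by push_cast; ring]
    rw [PySem.List.pySetD_natCast]
    rw [show (↑((arr.length + 1) / 2) + (k:Int)) = (((arr.length + 1) / 2 + k : Nat) : Int) by push_cast; ring]
    rw [PySem.List.pyGetD_natCast]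
  simp only [e1, e2]
  rw [pvF1, pvF2]

-- Port B, reduced to pvInter (for 3 ≤ length)
lemma portB_eq (arr : List Int) (h : 3 ≤ arr.length) :
    perfect_shuffle_practice_alt arr =
      (if arr.length - (arr.length + 1) / 2 < (arr.length + 1) / 2 then
        pvInter (arr.take ((arr.length + 1) / 2)) (arr.drop ((arr.length + 1) / 2))
          ++ [PySem.List.pyGetD (arr.take ((arr.length + 1) / 2)) (-1) 0]
      else
        pvInter (arr.take ((arr.length + 1) / 2)) (arr.drop ((arr.length + 1) / 2))) := by
  have h3 : ¬ ((arr.length : Int) < 3) := by exact_mod_cast not_lt.mpr (by exact_mod_cast h)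
  have hmid : PySem.Int.floordiv ((arr.length : Int) + 1) 2 = (((arr.length + 1) / 2 : Nat) : Int) := by
    rw [show ((arr.length : Int) + 1) = (((arr.length + 1 : Nat)) : Int) by push_cast; ring]
    exact_mod_cast PySem.Int.floordiv_natCast (arr.length + 1) 2
  simp only [perfect_shuffle_practice_alt, if_neg h3, hmid,
    PySem.List.slice_to_natCast, PySem.List.slice_from_natCast,
    PySem.List.foldl_append_eq_flatMap, List.nil_append,
    List.length_take, List.length_drop]
  rw [pvInter]
  rw [show min ((arr.length + 1) / 2) arr.length = (arr.length + 1) / 2 from by omega]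

lemma pvInter_len (f s : List Int) : (pvInter f s).length = 2 * min f.length s.length := by
  induction f generalizing s with
  | nil => simp [pvInter]
  | cons x f ih =>
    cases s with
    | nil => simp [pvInter]
    | cons y s => simp [pvInter] at ih ⊢; rw [ih]; omega

lemma pvInter_get (f s : List Int) (k : Nat) :
    (pvInter f s)[k]? =
      if k < 2 * min f.length s.length then
        (if k % 2 = 0 then f[k / 2]? else s[k / 2]?)
      else none := by
  induction f generalizing s k with
  | nil => simp [pvInter]
  | cons x f ih =>
    cases s with
    | nil => simp [pvInter]
    | cons y s =>
      match k with
      | 0 => simp [pvInter]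
      | 1 => simp [pvInter]; omega
      | (k + 2) =>
        have hstep : (pvInter (x :: f) (y :: s))[k + 2]? = (pvInter f s)[k]? := by
          simp [pvInter]
        rw [hstep, ih]
        have h2 : (k + 2) / 2 = k / 2 + 1 := by omega
        have h0 : (k + 2) % 2 = k % 2 := by omega
        rw [h2, h0]
        simp only [List.length_cons]
        split_ifs <;> first | rfl | omega

-- element-wise description of A's result
lemma A_get (arr : List Int) (h : 3 ≤ arr.length) (j : Nat) (hj : j < arr.length) :
    (perfect_shuffle_practice arr)[j]? =
      some (if j % 2 = 0 then arr.getD (j / 2) 0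
            else arr.getD ((arr.length + 1) / 2 + j / 2) 0) := by
  rw [portA_eq arr h, pvF2_get, pvF1_get]
  simp only [List.length_replicate]
  by_cases h0 : j % 2 = 0
  · have hlt : j / 2 < (arr.length + 1) / 2 := by omega
    simp [h0, hlt, hj]
  · have h1 : j % 2 = 1 := by omega
    have hlt : j / 2 < arr.length - (arr.length + 1) / 2 := by omega
    simp [h1, hlt, hj, pvF1_len]

lemma A_len (arr : List Int) (h : 3 ≤ arr.length) :
    (perfect_shuffle_practice arr).length = arr.length := by
  rw [portA_eq arr h, pvF2_len, pvF1_len, List.length_replicate]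

-- element-wise description of B's result
lemma B_get (arr : List Int) (h : 3 ≤ arr.length) (j : Nat) (hj : j < arr.length) :
    (perfect_shuffle_practice_alt arr)[j]? =
      some (if j % 2 = 0 then arr.getD (j / 2) 0
            else arr.getD ((arr.length + 1) / 2 + j / 2) 0) := by
  rw [portB_eq arr h]
  have hlen1 : (arr.take ((arr.length + 1) / 2)).length = (arr.length + 1) / 2 := by
    simp; omega
  have hlen2 : (arr.drop ((arr.length + 1) / 2)).length = arr.length - (arr.length + 1) / 2 := by
    simp
  have hmin : min (arr.take ((arr.length + 1) / 2)).length (arr.drop ((arr.length + 1) / 2)).length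
      = arr.length - (arr.length + 1) / 2 := by
    rw [hlen1, hlen2]; omega
  by_cases hc : arr.length - (arr.length + 1) / 2 < (arr.length + 1) / 2
  · -- odd length: an extra trailing element from the first half
    rw [if_pos hc, List.getElem?_append, pvInter_len, hmin]
    by_cases hj2 : j < 2 * (arr.length - (arr.length + 1) / 2)
    · rw [if_pos hj2, pvInter_get, hmin, if_pos hj2]
      by_cases h0 : j % 2 = 0
      · rw [if_pos h0, if_pos h0, List.getElem?_take, if_pos (show j / 2 < (arr.length + 1) / 2 by omega),
          List.getElem?_eq_getElem (show j / 2 < arr.length by omega),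
          List.getD_eq_getElem arr 0 (show j / 2 < arr.length by omega)]
      · rw [if_neg h0, if_neg h0, List.getElem?_drop,
          List.getElem?_eq_getElem (show (arr.length + 1) / 2 + j / 2 < arr.length by omega),
          List.getD_eq_getElem arr 0 (show (arr.length + 1) / 2 + j / 2 < arr.length by omega)]
    · -- j = arr.length - 1, the appended last element of the first half
      rw [if_neg hj2]
      have hj1 : j - 2 * (arr.length - (arr.length + 1) / 2) = 0 := by omega
      rw [hj1]
      have hne : arr.take ((arr.length + 1) / 2) ≠ [] := by
        apply List.ne_nil_of_length_pos; omega
      rw [PySem.List.pyGetD_neg_one _ _ hne]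
      have h0 : j % 2 = 0 := by omega
      rw [if_pos h0, List.getLast_eq_getElem]
      have hj2' : j / 2 = (arr.length + 1) / 2 - 1 := by omega
      simp only [List.getElem?_cons_zero, List.getElem_take, hlen1, hj2',
        List.getD_eq_getElem arr 0 (show (arr.length + 1) / 2 - 1 < arr.length by omega)]
  · -- even length: the zip covers everything
    rw [if_neg hc, pvInter_get, hmin, if_pos (show j < 2 * (arr.length - (arr.length + 1) / 2) by omega)]
    by_cases h0 : j % 2 = 0
    · rw [if_pos h0, if_pos h0, List.getElem?_take, if_pos (show j / 2 < (arr.length + 1) / 2 by omega),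
        List.getElem?_eq_getElem (show j / 2 < arr.length by omega),
        List.getD_eq_getElem arr 0 (show j / 2 < arr.length by omega)]
    · rw [if_neg h0, if_neg h0, List.getElem?_drop,
        List.getElem?_eq_getElem (show (arr.length + 1) / 2 + j / 2 < arr.length by omega),
        List.getD_eq_getElem arr 0 (show (arr.length + 1) / 2 + j / 2 < arr.length by omega)]

lemma B_len (arr : List Int) (h : 3 ≤ arr.length) :
    (perfect_shuffle_practice_alt arr).length = arr.length := by
  rw [portB_eq arr h]
  split_ifs <;>
    simp [pvInter_len, List.length_take, List.length_drop] <;> omega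

lemma small_eq (arr : List Int) (h : arr.length < 3) :
    perfect_shuffle_practice arr = perfect_shuffle_practice_alt arr := by
  have h' : (arr.length : Int) < 3 := by exact_mod_cast h
  unfold perfect_shuffle_practice perfect_shuffle_practice_alt
  simp [h']

-- ===== VERDICT (by name: the statement is the Claim_ definition above) =====
theorem perfect_shuffle_practice_spec : Claim_equal_perfect_shuffle_practice := by
  intro arr _
  unfold Spec_perfect_shuffle_practice
  by_cases h : 3 ≤ arr.length
  · apply List.ext_getElem?
    intro j
    by_cases hj : j < arr.length
    · rw [A_get arr h j hj, B_get arr h j hj]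
    · rw [List.getElem?_eq_none, List.getElem?_eq_none]
      · rw [B_len arr h]; omega
      · rw [A_len arr h]; omega
  · exact small_eq arr (by omega)
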